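-- pv_equiv track=rewrite | github.com/BJV-git/leetcode | array/sort_by_parity_II.py | sort_iis_parity
-- ===== SOURCE A (Python) =====
-- def sort_iis_parity(A):
--
--         odd=[]
--         even =[]
--         i=0
--         while A:
--
--             a = A.pop()
--             if a%2==0:
--                 even.append(a)
--             else:
--                 odd.append(a)
--             i+=1
--         for j in range(i//2):
--             A.append(even.pop())
--             A.append(odd.pop())
--         return A
-- ===== SOURCE B (Python) =====
-- def sort_iis_parity(A):
--     evens = [x for x in A if x % 2 == 0]
--     odds = [x for x in A if x % 2 != 0]
--     res = []
--     for k in range(len(A) // 2):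
--         res.append(evens[k])
--         res.append(odds[k])
--     A[:] = res
--     return A
-- ===== Notes on version B (the rewrite author's own statement) =====
-- stated objective: simpler
-- what changed: A destructively pops the list from the back into reversed even/odd stacks and then pops those stacks to rebuild; B takes two forward filter passes and interleaves by index, with no mutation-driven stack discipline.
import Mathlib
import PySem

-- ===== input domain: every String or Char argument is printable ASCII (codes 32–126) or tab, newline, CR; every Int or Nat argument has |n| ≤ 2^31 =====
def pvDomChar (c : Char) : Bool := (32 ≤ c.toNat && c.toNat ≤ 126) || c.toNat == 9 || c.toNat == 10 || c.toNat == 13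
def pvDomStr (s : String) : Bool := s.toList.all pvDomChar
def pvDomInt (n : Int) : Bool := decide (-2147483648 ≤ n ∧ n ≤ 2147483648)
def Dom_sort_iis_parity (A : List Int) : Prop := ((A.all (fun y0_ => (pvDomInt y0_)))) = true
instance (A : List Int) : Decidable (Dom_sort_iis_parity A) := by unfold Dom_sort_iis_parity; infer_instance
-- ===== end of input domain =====

-- B replaces A's destructive pop-into-stacks-and-pop-back scheme by two forward filter
-- passes and index interleaving (objective: simpler). Both Pythons mutate the argument
-- list in place the same way on inputs in Pre_; the theorems are about the return value.

-- ===== PORT A =====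
-- while A: a = A.pop(); (even/odd).append(a); i += 1
-- (A.pop() on the nonempty A is A.getLastD 0 / dropLast, exact since A ≠ [] in the loop)
def pvPopPhase (A even odd : List Int) (i : Nat) : List Int × List Int × Nat :=
  if h : A = [] then (even, odd, i)
  else
    let a := A.getLastD 0
    if a % 2 == 0 then pvPopPhase A.dropLast (even ++ [a]) odd (i + 1)
    else pvPopPhase A.dropLast even (odd ++ [a]) (i + 1)
termination_by A.length
decreasing_by
  all_goals
    have : A.length ≠ 0 := fun hn => h (List.eq_nil_of_length_eq_zero hn)
    simp [List.length_dropLast]; omega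

-- for j in range(i//2): A.append(even.pop()); A.append(odd.pop())
-- (even.pop()/odd.pop() as getLastD 0 / dropLast; Python raises IndexError on an empty
-- stack — exactly the inputs Pre_ excludes, so the default 0 is never the value there)
def pvRefillPhase : Nat → List Int → List Int → List Int → List Int
  | 0, acc, _, _ => acc
  | m + 1, acc, even, odd =>
      pvRefillPhase m (acc ++ [even.getLastD 0, odd.getLastD 0]) even.dropLast odd.dropLast

def sort_iis_parity (A : List Int) : List Int :=
  let r := pvPopPhase A [] [] 0
  pvRefillPhase (r.2.2 / 2) [] r.1 r.2.1

-- ===== PORT B =====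
-- evens/odds by two forward filters, then res built by indexing k = 0 .. len(A)//2 - 1
-- (evens[k]/odds[k] as getD k 0; Python raises IndexError out of range — outside Pre_)
def sort_iis_parity_alt (A : List Int) : List Int :=
  let evens := A.filter (fun x => x % 2 == 0)
  let odds := A.filter (fun x => !(x % 2 == 0))
  (List.range (A.length / 2)).foldl (fun res k => res ++ [evens.getD k 0, odds.getD k 0]) []

-- ===== PRECONDITION & SPEC =====
-- Pre_ = exactly the inputs where Python A returns: with fewer than len(A)//2 evens or
-- fewer than len(A)//2 odds, A raises IndexError (pop from empty list), and B raises
-- IndexError there too (out-of-range indexing).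
def Pre_sort_iis_parity (A : List Int) : Prop :=
  A.length / 2 ≤ (A.filter (fun x => x % 2 == 0)).length ∧
  A.length / 2 ≤ (A.filter (fun x => !(x % 2 == 0))).length
instance (A : List Int) : Decidable (Pre_sort_iis_parity A) := by
  unfold Pre_sort_iis_parity; infer_instance
def pvWitness_sort_iis_parity : List Int := [3, 2, 5, 8]

def Spec_sort_iis_parity (A : List Int) (out : List Int) : Prop := out = sort_iis_parity_alt A
instance (A : List Int) (out : List Int) : Decidable (Spec_sort_iis_parity A out) := by unfold Spec_sort_iis_parity; infer_instance

-- ===== CLAIM (what is proved, stated in full; the proofs are below) =====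
def Claim_equal_sort_iis_parity : Prop := ∀ (A : List Int), Dom_sort_iis_parity A → Pre_sort_iis_parity A → Spec_sort_iis_parity A (sort_iis_parity A)

-- ===== LEMMAS AND PROOFS =====

-- the common normal form both ports reduce to
def pvInterleave : Nat → List Int → List Int → List Int
  | 0, _, _ => []
  | m + 1, E, O => E.headD 0 :: O.headD 0 :: pvInterleave m E.tail O.tail

theorem pvPopPhase_spec (A even odd : List Int) (i : Nat) :
    pvPopPhase A even odd i =
      (even ++ (A.filter (fun x => x % 2 == 0)).reverse,
       odd ++ (A.filter (fun x => !(x % 2 == 0))).reverse,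
       i + A.length) := by
  induction A using List.reverseRecOn generalizing even odd i with
  | nil => simp [pvPopPhase]
  | append_singleton as a ih =>
      rw [pvPopPhase]
      by_cases hp : a % 2 == 0 <;>
        simp [hp, ih, List.filter_append, List.reverse_append, List.append_assoc] <;> omega

theorem pvRefillPhase_spec (m : Nat) (acc E O : List Int) :
    pvRefillPhase m acc E.reverse O.reverse = acc ++ pvInterleave m E O := by
  induction m generalizing acc E O with
  | zero => simp [pvRefillPhase, pvInterleave]
  | succ m ih =>
      have hE : E.reverse.getLastD 0 = E.headD 0 := by cases E <;> simp
      have hO : O.reverse.getLastD 0 = O.headD 0 := by cases O <;> simp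
      have hE' : E.reverse.dropLast = E.tail.reverse := by cases E <;> simp
      have hO' : O.reverse.dropLast = O.tail.reverse := by cases O <;> simp
      rw [pvRefillPhase, hE, hO, hE', hO', ih]
      simp [pvInterleave]

theorem pvGetD_succ_tail (E : List Int) (k : Nat) : E.getD (k + 1) 0 = E.tail.getD k 0 := by
  cases E <;> simp

theorem pvFold_spec (m : Nat) (acc E O : List Int) :
    (List.range m).foldl (fun res k => res ++ [E.getD k 0, O.getD k 0]) acc =
      acc ++ pvInterleave m E O := by
  induction m generalizing acc E O with
  | zero => simp [pvInterleave]
  | succ m ih =>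
      rw [List.range_succ_eq_map, List.foldl_cons, List.foldl_map]
      simp only [pvGetD_succ_tail]
      rw [ih]
      cases E <;> cases O <;> simp [pvInterleave]

-- ===== VERDICT (by name: the statement is the Claim_ definition above) =====
theorem sort_iis_parity_spec : Claim_equal_sort_iis_parity := by
  intro A _ _
  unfold Spec_sort_iis_parity sort_iis_parity sort_iis_parity_alt
  rw [pvPopPhase_spec, pvFold_spec]
  simp [pvRefillPhase_spec (A.length / 2) []
    (A.filter (fun x => x % 2 == 0)) (A.filter (fun x => !(x % 2 == 0)))]
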